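-- pv_equiv track=rewrite | github.com/zahere/agentic-community | agentic_community/tools/data_tools.py | merge_csv
-- ===== SOURCE A (Python) =====
-- from typing import Any, Dict, List, Optional, Union, Callable
--
-- def merge_csv(csv_data1: List[Dict], csv_data2: List[Dict], key: str) -> List[Dict]:
--     """
--     Merge two CSV datasets on a common key.
--
--     Args:
--         csv_data1: First dataset
--         csv_data2: Second dataset
--         key: Common key field
--
--     Returns:
--         Merged data
--     """
--     # Create lookup from second dataset
--     lookup = {row[key]: row for row in csv_data2 if key in row}
--
--     # Merge
--     merged = []
--     for row in csv_data1:
--         if key in row: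
--             merged_row = row.copy()
--             if row[key] in lookup:
--                 # Merge fields from second dataset
--                 for field, value in lookup[row[key]].items():
--                     if field != key:
--                         merged_row[f"{field}_2"] = value
--             merged.append(merged_row)
--
--     return merged
-- ===== SOURCE B (Python) =====
-- def merge_csv(csv_data1, csv_data2, key):
--     """Merge two CSV datasets on a common key (nested-loop join, no index)."""
--     merged = []
--     for row in csv_data1:
--         if key not in row:
--             continue
--         merged_row = row.copy()
--         match = None
--         for row2 in csv_data2:
--             if key in row2 and row2[key] == row[key]:
--                 match = row2  # keep scanning: last matching row wins
--         if match is not None: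
--             for field, value in match.items():
--                 if field != key:
--                     merged_row[f"{field}_2"] = value
--         merged.append(merged_row)
--     return merged
-- ===== Notes on version B (the rewrite author's own statement) =====
-- stated objective: alternative
-- what changed: Replaces the precomputed dict index over csv_data2 plus single-pass lookup with a naive nested-loop join that rescans csv_data2 for each row, keeping the last matching row to reproduce the dict's overwrite semantics.
import Mathlib
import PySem

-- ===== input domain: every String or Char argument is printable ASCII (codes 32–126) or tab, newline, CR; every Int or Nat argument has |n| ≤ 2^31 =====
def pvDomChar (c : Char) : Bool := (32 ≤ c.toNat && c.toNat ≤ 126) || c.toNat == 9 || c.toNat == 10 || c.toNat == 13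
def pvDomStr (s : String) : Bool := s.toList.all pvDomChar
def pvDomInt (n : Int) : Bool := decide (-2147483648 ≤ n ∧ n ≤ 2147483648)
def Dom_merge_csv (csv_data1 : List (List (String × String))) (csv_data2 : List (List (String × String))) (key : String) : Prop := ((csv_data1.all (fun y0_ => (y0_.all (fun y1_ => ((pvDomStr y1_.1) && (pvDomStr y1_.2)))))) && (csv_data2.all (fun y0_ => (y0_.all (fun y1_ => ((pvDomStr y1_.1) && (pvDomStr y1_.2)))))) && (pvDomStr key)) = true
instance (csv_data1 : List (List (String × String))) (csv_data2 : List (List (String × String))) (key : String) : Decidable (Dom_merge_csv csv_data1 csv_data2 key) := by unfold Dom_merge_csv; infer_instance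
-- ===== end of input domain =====

-- B replaces A's dict index over csv_data2 with a nested-loop join (last match wins); alternative decomposition, same results.
-- Rows (Python dicts) arrive as association lists; each port turns a row into a PySem.Dict first, exactly as dict() would.

-- ===== PORT A =====
-- shared with B only as Python shares it: copying the matched row's non-key fields with the "_2" suffix
def pvAddFields (key : String) (mr : PySem.Dict String String) (r2 : PySem.Dict String String) : PySem.Dict String String :=
  r2.items.foldl (fun m fv => if fv.1 = key then m else m.insert (fv.1 ++ "_2") fv.2) mr

def merge_csv (csv_data1 : List (List (String × String))) (csv_data2 : List (List (String × String))) (key : String) : List (List (String × String)) :=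
  -- lookup = {row[key]: row for row in csv_data2 if key in row}
  let lookup : PySem.Dict String (PySem.Dict String String) :=
    csv_data2.foldl (fun acc r =>
      let row := PySem.Dict.ofList r
      if row.contains key then acc.insert (row.getD key "") row else acc) PySem.Dict.empty
  csv_data1.foldl (fun merged r =>
    let row := PySem.Dict.ofList r
    if row.contains key then
      let mr :=
        match lookup.get? (row.getD key "") with
        | some r2 => pvAddFields key row r2
        | none => row
      merged ++ [mr.items]
    else merged) []

-- ===== PORT B =====
def merge_csv_alt (csv_data1 : List (List (String × String))) (csv_data2 : List (List (String × String))) (key : String) : List (List (String × String)) :=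
  csv_data1.foldl (fun merged r =>
    let row := PySem.Dict.ofList r
    if row.contains key then
      -- inner scan of csv_data2: keep updating, last matching row wins
      let mtch : Option (PySem.Dict String String) :=
        csv_data2.foldl (fun best r2 =>
          let row2 := PySem.Dict.ofList r2
          if row2.contains key && (row2.getD key "" == row.getD key "") then some row2 else best) none
      let mr :=
        match mtch with
        | some r2 => pvAddFields key row r2
        | none => row
      merged ++ [mr.items]
    else merged) []

-- ===== PRECONDITION & SPEC =====
def Spec_merge_csv (csv_data1 : List (List (String × String))) (csv_data2 : List (List (String × String))) (key : String) (out : List (List (String × String))) : Prop := out = merge_csv_alt csv_data1 csv_data2 key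
instance (csv_data1 : List (List (String × String))) (csv_data2 : List (List (String × String))) (key : String) (out : List (List (String × String))) : Decidable (Spec_merge_csv csv_data1 csv_data2 key out) := by unfold Spec_merge_csv; infer_instance

-- ===== CLAIM (what is proved, stated in full; the proofs are below) =====
def Claim_equal_merge_csv : Prop := ∀ (csv_data1 : List (List (String × String))) (csv_data2 : List (List (String × String))) (key : String), Dom_merge_csv csv_data1 csv_data2 key → Spec_merge_csv csv_data1 csv_data2 key (merge_csv csv_data1 csv_data2 key)

-- ===== LEMMAS AND PROOFS =====

-- A's index lookup at v equals B's last-match scan of csv_data2, for any starting dict/accumulator agreeing at v.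
theorem pvLookup_eq_scan (key v : String) (csv_data2 : List (List (String × String)))
    (D : PySem.Dict String (PySem.Dict String String)) :
    (csv_data2.foldl (fun acc r =>
        let row := PySem.Dict.ofList r
        if row.contains key then acc.insert (row.getD key "") row else acc) D).get? v
    = csv_data2.foldl (fun best r2 =>
        let row2 := PySem.Dict.ofList r2
        if row2.contains key && (row2.getD key "" == v) then some row2 else best) (D.get? v) := by
  induction csv_data2 generalizing D with
  | nil => rfl
  | cons r rest ih =>
    simp only [List.foldl_cons]
    by_cases hc : (PySem.Dict.ofList r).contains key = true
    · simp only [hc, if_pos, Bool.true_and]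
      by_cases he : (PySem.Dict.ofList r).getD key "" = v
      · rw [ih]
        simp [he, PySem.Dict.get?_insert_self]
      · rw [ih]
        have : (D.insert ((PySem.Dict.ofList r).getD key "") (PySem.Dict.ofList r)).get? v = D.get? v :=
          PySem.Dict.get?_insert_of_ne D _ (fun h => he h.symm)
        simp [this, he]
    · simp [hc, ih]

-- ===== VERDICT (by name: the statement is the Claim_ definition above) =====
theorem merge_csv_spec : Claim_equal_merge_csv := by
  intro csv_data1 csv_data2 key _
  unfold Spec_merge_csv merge_csv merge_csv_alt
  have h : (fun (merged : List (List (String × String))) (r : List (String × String)) =>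
      let row := PySem.Dict.ofList r
      if row.contains key then
        let mr :=
          match (csv_data2.foldl (fun acc r =>
              let row := PySem.Dict.ofList r
              if row.contains key then acc.insert (row.getD key "") row else acc)
              PySem.Dict.empty).get? (row.getD key "") with
          | some r2 => pvAddFields key row r2
          | none => row
        merged ++ [mr.items]
      else merged)
      = (fun (merged : List (List (String × String))) (r : List (String × String)) =>
      let row := PySem.Dict.ofList r
      if row.contains key then
        let mtch : Option (PySem.Dict String String) :=
          csv_data2.foldl (fun best r2 =>
            let row2 := PySem.Dict.ofList r2
            if row2.contains key && (row2.getD key "" == row.getD key "") then some row2 else best) none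
        let mr :=
          match mtch with
          | some r2 => pvAddFields key row r2
          | none => row
        merged ++ [mr.items]
      else merged) := by
    funext merged r
    simp only [pvLookup_eq_scan key ((PySem.Dict.ofList r).getD key "") csv_data2 PySem.Dict.empty]
    rfl
  exact congrArg (fun f => List.foldl f ([] : List (List (String × String))) csv_data1) h
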